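-- pv_equiv track=rewrite | github.com/mingzhu0527/code_processing | utils/sample_utils.py | hypo_filtering
-- ===== SOURCE A (Python) =====
-- def hypo_filtering(result_id_dict, result_id_dict_gold, result_key_dict, program_dict):
--     non_buggy_pid_dict = {}
--     buggy_pids = []
--     for pid, result_keys in result_key_dict.items():
--         good_samples = []
--         for i, result_key in enumerate(result_keys):
--             if result_key != 'error':
--                 if program_dict[pid][i] != "":
--                     good_samples.append(i)
--         if len(good_samples) == 0:
--             buggy_pids.append(pid)
--         else:
--             non_buggy_pid_dict[pid] = good_samples
--
--     failed_test_pids = []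
--     passed_test_pid_dict = {}
--     for pid, idx_list in non_buggy_pid_dict.items():
--         pid_results = result_id_dict[pid]
--         pid_result_gold = result_id_dict_gold[pid][0]
--         pid_results_filtered = []
--         for idx in idx_list:
--             pid_result = pid_results[idx]
--             if pid_result_gold != "" and pid_result == pid_result_gold:
--                 pid_results_filtered.append(idx)
--         if len(pid_results_filtered) == 0:
--             failed_test_pids.append(pid)
--         else:
--             passed_test_pid_dict[pid] = pid_results_filtered
--
--     passed_hypo_dict = {}
--     for pid, idx_list in passed_test_pid_dict.items():
--         hypos = [program_dict[pid][x] for x in idx_list]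
--         passed_hypo_dict[pid] = hypos
--     return buggy_pids, failed_test_pids, passed_hypo_dict
-- ===== SOURCE B (Python) =====
-- def _statuses(result_id_dict, result_id_dict_gold, program_dict, pid, keys):
--     # score a single sample: 0 = bad (error key or empty program),
--     # 1 = good but fails the gold test, 2 = passes the gold test
--     st = []
--     for i, key in enumerate(keys):
--         if key == 'error' or program_dict[pid][i] == "":
--             st.append(0)
--         else:
--             gold = result_id_dict_gold[pid][0]
--             st.append(2 if gold != "" and result_id_dict[pid][i] == gold else 1)
--     return st
--
-- def hypo_filtering(result_id_dict, result_id_dict_gold, result_key_dict, program_dict):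
--     # score every sample 0/1/2 once, then bucket each pid by its best score
--     stat = {pid: _statuses(result_id_dict, result_id_dict_gold, program_dict, pid, keys)
--             for pid, keys in result_key_dict.items()}
--     buggy_pids = [pid for pid, st in stat.items() if max(st, default=0) == 0]
--     failed_test_pids = [pid for pid, st in stat.items() if max(st, default=0) == 1]
--     passed_hypo_dict = {pid: [program_dict[pid][i] for i, s in enumerate(st) if s == 2]
--                         for pid, st in stat.items() if 2 in st}
--     return buggy_pids, failed_test_pids, passed_hypo_dict
-- ===== Notes on version B (the rewrite author's own statement) =====
-- stated objective: alternative
-- what changed: A's staged pipeline (build good-index lists, filter them through the gold test into intermediate dicts, then map indices to programs) is replaced by a per-sample ternary scoring: every sample gets a status 0/1/2 computed once, and each pid is bucketed by the maximum of its status vector, with all three outputs built declaratively from that single status table.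
import Mathlib
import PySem

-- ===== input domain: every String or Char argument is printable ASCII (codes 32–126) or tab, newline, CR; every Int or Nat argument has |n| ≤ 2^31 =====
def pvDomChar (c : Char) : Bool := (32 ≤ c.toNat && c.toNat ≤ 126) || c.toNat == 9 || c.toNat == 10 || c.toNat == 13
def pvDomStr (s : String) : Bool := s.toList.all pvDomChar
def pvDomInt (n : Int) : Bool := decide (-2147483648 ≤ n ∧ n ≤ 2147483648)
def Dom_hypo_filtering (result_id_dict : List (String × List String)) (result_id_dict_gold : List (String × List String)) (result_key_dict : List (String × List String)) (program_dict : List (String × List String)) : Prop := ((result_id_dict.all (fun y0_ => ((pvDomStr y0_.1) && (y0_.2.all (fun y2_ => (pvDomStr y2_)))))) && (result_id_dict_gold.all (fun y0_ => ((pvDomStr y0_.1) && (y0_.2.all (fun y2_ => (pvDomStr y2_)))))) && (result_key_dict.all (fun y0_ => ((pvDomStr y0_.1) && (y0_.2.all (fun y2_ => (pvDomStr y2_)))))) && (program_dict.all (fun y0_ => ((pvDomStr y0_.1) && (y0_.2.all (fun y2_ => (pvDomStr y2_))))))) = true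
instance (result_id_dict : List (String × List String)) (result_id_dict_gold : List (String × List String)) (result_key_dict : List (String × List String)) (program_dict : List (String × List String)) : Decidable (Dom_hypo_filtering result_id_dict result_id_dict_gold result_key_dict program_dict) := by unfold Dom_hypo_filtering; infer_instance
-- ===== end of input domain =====

-- B replaces A's staged index-list pipeline by per-sample 0/1/2 scoring and bucketing each pid
-- by the maximum of its status vector (objective: alternative decomposition, same cost).

-- shared helper: dict lookup (first match; Pre_ demands unique keys, so it matches Python's dict)
def pvLookup (d : List (String × List String)) (k : String) : List String :=
  ((d.find? (fun p => p.1 == k)).map Prod.snd).getD []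

-- ===== PORT A =====
-- inner loop of pass 1: 'for i, result_key in enumerate(result_keys): …'
def pvGoodA (keys : List String) (prog : List String) (i : Nat) : List Nat :=
  match keys with
  | [] => []
  | k :: ks =>
    if k ≠ "error" then
      if prog.getD i "" ≠ "" then i :: pvGoodA ks prog (i + 1) else pvGoodA ks prog (i + 1)
    else pvGoodA ks prog (i + 1)

-- pass 1: build (non_buggy_pid_dict, buggy_pids)
def pvPass1 (program_dict : List (String × List String)) (rkd : List (String × List String)) :
    List (String × List Nat) × List String :=
  match rkd with
  | [] => ([], [])
  | (pid, keys) :: rest =>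
    let gs := pvGoodA keys (pvLookup program_dict pid) 0
    let r := pvPass1 program_dict rest
    if gs.length = 0 then (r.1, pid :: r.2) else ((pid, gs) :: r.1, r.2)

-- inner loop of pass 2: 'for idx in idx_list: …'
def pvFilterA (results : List String) (gold : String) (idxs : List Nat) : List Nat :=
  match idxs with
  | [] => []
  | i :: rest =>
    if gold ≠ "" ∧ results.getD i "" = gold then i :: pvFilterA results gold rest
    else pvFilterA results gold rest

-- pass 2: build (failed_test_pids, passed_test_pid_dict)
def pvPass2 (rid ridg : List (String × List String)) (nb : List (String × List Nat)) :
    List String × List (String × List Nat) :=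
  match nb with
  | [] => ([], [])
  | (pid, idxs) :: rest =>
    let f := pvFilterA (pvLookup rid pid) ((pvLookup ridg pid).getD 0 "") idxs
    let r := pvPass2 rid ridg rest
    if f.length = 0 then (pid :: r.1, r.2) else (r.1, (pid, f) :: r.2)

-- pass 3: passed_hypo_dict
def pvPass3 (pd : List (String × List String)) (ps : List (String × List Nat)) :
    List (String × List String) :=
  ps.map (fun p => (p.1, p.2.map (fun x => (pvLookup pd p.1).getD x "")))

def hypo_filtering (result_id_dict : List (String × List String)) (result_id_dict_gold : List (String × List String)) (result_key_dict : List (String × List String)) (program_dict : List (String × List String)) : List String × List String × (List (String × List String)) :=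
  let p1 := pvPass1 program_dict result_key_dict
  let p2 := pvPass2 result_id_dict result_id_dict_gold p1.1
  (p1.2, p2.1, pvPass3 program_dict p2.2)

-- ===== PORT B =====
-- Source B's _statuses: score sample i as 0 (error key or empty program), 2 (passes gold test), else 1
def pvStatuses (rid ridg pd : List (String × List String)) (pid : String) :
    List String → Nat → List Nat
  | [], _ => []
  | k :: ks, i =>
    (if k = "error" ∨ (pvLookup pd pid).getD i "" = "" then 0
     else if (pvLookup ridg pid).getD 0 "" ≠ "" ∧
             (pvLookup rid pid).getD i "" = (pvLookup ridg pid).getD 0 "" then 2 else 1)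
      :: pvStatuses rid ridg pd pid ks (i + 1)

-- Source B's hypo_filtering: one status table, three declarative outputs bucketed by max status
def hypo_filtering_alt (result_id_dict : List (String × List String)) (result_id_dict_gold : List (String × List String)) (result_key_dict : List (String × List String)) (program_dict : List (String × List String)) : List String × List String × (List (String × List String)) :=
  let stat := result_key_dict.map
    (fun e => (e.1, pvStatuses result_id_dict result_id_dict_gold program_dict e.1 e.2 0))
  ((stat.filter (fun p => p.2.foldr max 0 == 0)).map Prod.fst,
   (stat.filter (fun p => p.2.foldr max 0 == 1)).map Prod.fst,
   (stat.filter (fun p => p.2.contains 2)).map (fun p =>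
     (p.1, ((p.2.zipIdx).filter (fun q => q.1 == 2)).map
       (fun q => (pvLookup program_dict p.1).getD q.2 ""))))

-- ===== PRECONDITION & SPEC =====
-- Pre_ excludes exactly the inputs where Python A raises (KeyError/IndexError on one of the three
-- lookup dicts) and, because the Lean arguments are association lists standing for Python dicts,
-- the representationally ambiguous duplicate-key lists; the per-pid length bounds are slightly
-- stronger than the last index A actually touches (see cites in the claim).
def Pre_hypo_filtering (result_id_dict : List (String × List String)) (result_id_dict_gold : List (String × List String)) (result_key_dict : List (String × List String)) (program_dict : List (String × List String)) : Prop :=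
  (result_key_dict.map Prod.fst).Nodup ∧ (program_dict.map Prod.fst).Nodup ∧
  (result_id_dict.map Prod.fst).Nodup ∧ (result_id_dict_gold.map Prod.fst).Nodup ∧
  ∀ e ∈ result_key_dict,
    ((∃ i < e.2.length, e.2.getD i "" ≠ "error") →
      e.1 ∈ program_dict.map Prod.fst ∧ e.2.length ≤ (pvLookup program_dict e.1).length) ∧
    ((∃ i < e.2.length, e.2.getD i "" ≠ "error" ∧ (pvLookup program_dict e.1).getD i "" ≠ "") →
      e.1 ∈ result_id_dict.map Prod.fst ∧ e.2.length ≤ (pvLookup result_id_dict e.1).length ∧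
      e.1 ∈ result_id_dict_gold.map Prod.fst ∧ (pvLookup result_id_dict_gold e.1) ≠ [])
instance (result_id_dict : List (String × List String)) (result_id_dict_gold : List (String × List String)) (result_key_dict : List (String × List String)) (program_dict : List (String × List String)) : Decidable (Pre_hypo_filtering result_id_dict result_id_dict_gold result_key_dict program_dict) := by unfold Pre_hypo_filtering; infer_instance

def pvWitness_hypo_filtering : (List (String × List String)) × (List (String × List String)) × (List (String × List String)) × (List (String × List String)) :=
  ([("p", ["r"])], [("p", ["r"])], [("p", ["ok"])], [("p", ["x"])])

def Spec_hypo_filtering (result_id_dict : List (String × List String)) (result_id_dict_gold : List (String × List String)) (result_key_dict : List (String × List String)) (program_dict : List (String × List String)) (out : List String × List String × (List (String × List String))) : Prop := out = hypo_filtering_alt result_id_dict result_id_dict_gold result_key_dict program_dict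
instance (result_id_dict : List (String × List String)) (result_id_dict_gold : List (String × List String)) (result_key_dict : List (String × List String)) (program_dict : List (String × List String)) (out : List String × List String × (List (String × List String))) : Decidable (Spec_hypo_filtering result_id_dict result_id_dict_gold result_key_dict program_dict out) := by unfold Spec_hypo_filtering; infer_instance

-- ===== CLAIM (what is proved, stated in full; the proofs are below) =====
def Claim_equal_hypo_filtering : Prop := ∀ (result_id_dict : List (String × List String)) (result_id_dict_gold : List (String × List String)) (result_key_dict : List (String × List String)) (program_dict : List (String × List String)), Dom_hypo_filtering result_id_dict result_id_dict_gold result_key_dict program_dict → Pre_hypo_filtering result_id_dict result_id_dict_gold result_key_dict program_dict → Spec_hypo_filtering result_id_dict result_id_dict_gold result_key_dict program_dict (hypo_filtering result_id_dict result_id_dict_gold result_key_dict program_dict)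

-- ===== LEMMAS AND PROOFS =====

-- A's good-sample loop = the nonzero-status indices
theorem pvGoodA_eq (rid ridg pd : List (String × List String)) (pid : String) :
    ∀ (keys : List String) (i : Nat),
      pvGoodA keys (pvLookup pd pid) i =
        (((pvStatuses rid ridg pd pid keys i).zipIdx i).filter
          (fun q => decide (q.1 ≠ 0))).map Prod.snd := by
  intro keys
  induction keys with
  | nil => intro i; simp [pvGoodA, pvStatuses]
  | cons k ks ih =>
    intro i
    simp only [pvGoodA, pvStatuses, List.zipIdx_cons, List.filter_cons]
    by_cases h1 : k = "error"
    · simp [h1, ih, List.getD]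
    · by_cases h2 : (pvLookup pd pid)[i]?.getD "" = ""
      · simp [h1, h2, ih, List.getD]
      · by_cases h3 : (pvLookup ridg pid)[0]?.getD "" ≠ "" ∧
            (pvLookup rid pid)[i]?.getD "" = (pvLookup ridg pid)[0]?.getD ""
        · simp [h1, h2, h3, ih, List.getD]
        · simp [h1, h2, h3, ih, List.getD]

-- A's gold-test filter on the good samples = the status-2 indices
theorem pvFilterA_eq (rid ridg pd : List (String × List String)) (pid : String) :
    ∀ (keys : List String) (i : Nat),
      pvFilterA (pvLookup rid pid) ((pvLookup ridg pid).getD 0 "")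
          (pvGoodA keys (pvLookup pd pid) i) =
        (((pvStatuses rid ridg pd pid keys i).zipIdx i).filter
          (fun q => q.1 == 2)).map Prod.snd := by
  intro keys
  induction keys with
  | nil => intro i; simp [pvGoodA, pvStatuses, pvFilterA]
  | cons k ks ih =>
    intro i
    simp only [List.getD] at ih
    simp only [pvGoodA, pvStatuses, List.zipIdx_cons, List.filter_cons]
    by_cases h1 : k = "error"
    · simp [h1, ih, List.getD]
    · by_cases h2 : (pvLookup pd pid)[i]?.getD "" = ""
      · simp [h1, h2, ih, List.getD]
      · by_cases h3 : (pvLookup ridg pid)[0]?.getD "" ≠ "" ∧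
            (pvLookup rid pid)[i]?.getD "" = (pvLookup ridg pid)[0]?.getD ""
        · simp [h1, h2, h3, pvFilterA, ih, List.getD]
        · simp [h1, h2, h3, pvFilterA, ih, List.getD]

-- statuses are at most 2
theorem pvStatuses_le_two (rid ridg pd : List (String × List String)) (pid : String) :
    ∀ (keys : List String) (i : Nat), ∀ s ∈ pvStatuses rid ridg pd pid keys i, s ≤ 2 := by
  intro keys
  induction keys with
  | nil => intro i s hs; simp [pvStatuses] at hs
  | cons k ks ih =>
    intro i s hs
    simp only [pvStatuses, List.mem_cons] at hs
    rcases hs with h | h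
    · subst h; split_ifs <;> omega
    · exact ih (i + 1) s h

-- Nat foldr-max facts
theorem le_foldr_max (l : List Nat) : ∀ s ∈ l, s ≤ l.foldr max 0 := by
  induction l with
  | nil => simp
  | cons x xs ih =>
    intro s hs
    rcases List.mem_cons.mp hs with h | h
    · subst h; exact Nat.le_max_left _ _
    · exact le_trans (ih s h) (Nat.le_max_right _ _)

theorem foldr_max_mem (l : List Nat) : l.foldr max 0 = 0 ∨ l.foldr max 0 ∈ l := by
  induction l with
  | nil => simp
  | cons x xs ih =>
    simp only [List.foldr]
    rcases Nat.le_total x (xs.foldr max 0) with h | h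
    · rcases ih with h0 | hm
      · rw [h0] at h ⊢; right
        rw [Nat.max_eq_right h, Nat.le_zero.mp h]; exact List.mem_cons_self
      · right; rw [Nat.max_eq_right h]; exact List.mem_cons_of_mem _ hm
    · right; rw [Nat.max_eq_left h]; exact List.mem_cons_self

theorem foldr_max_eq_zero_iff (l : List Nat) : l.foldr max 0 = 0 ↔ ∀ s ∈ l, s = 0 := by
  constructor
  · intro h s hs; have := le_foldr_max l s hs; omega
  · intro h
    rcases foldr_max_mem l with h0 | hm
    · exact h0
    · exact h _ hm

-- the zipIdx filter is empty iff no element satisfies the predicate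
theorem filter_zipIdx_eq_nil (p : Nat → Bool) (l : List Nat) (i : Nat) :
    ((l.zipIdx i).filter (fun q => p q.1)) = [] ↔ ∀ s ∈ l, ¬ p s := by
  rw [List.filter_eq_nil_iff]
  constructor
  · intro h s hs
    have hm : s ∈ (l.zipIdx i).map Prod.fst := by rw [List.zipIdx_map_fst]; exact hs
    obtain ⟨q, hq, hq1⟩ := List.mem_map.mp hm
    exact hq1 ▸ h q hq
  · intro h q hq
    exact h q.1 (List.fst_mem_of_mem_zipIdx hq)

-- the fused characterization: A's composite pipeline = B
theorem hypo_bucketed (rid ridg pd : List (String × List String)) :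
    ∀ rkd : List (String × List String),
      (let p1 := pvPass1 pd rkd
       let p2 := pvPass2 rid ridg p1.1
       (p1.2, p2.1, pvPass3 pd p2.2)) = hypo_filtering_alt rid ridg rkd pd := by
  intro rkd
  induction rkd with
  | nil => simp [pvPass1, pvPass2, pvPass3, hypo_filtering_alt]
  | cons e rest ih =>
    obtain ⟨pid, keys⟩ := e
    have ih' := ih
    simp only [hypo_filtering_alt, Prod.ext_iff] at ih'
    obtain ⟨ih1, ih2, ih3⟩ := ih'
    simp only [pvPass3, List.getD] at ih3 ⊢
    simp only [hypo_filtering_alt, List.map_cons, List.filter_cons, pvPass1]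
    have hgood := pvGoodA_eq rid ridg pd pid keys 0
    have hfil := pvFilterA_eq rid ridg pd pid keys 0
    by_cases hempty : (pvGoodA keys (pvLookup pd pid) 0).length = 0
    · -- buggy: all statuses zero
      have hfe : ((pvStatuses rid ridg pd pid keys 0).zipIdx 0).filter
          (fun q => decide (q.1 ≠ 0)) = [] := by
        have hnil := List.length_eq_zero_iff.mp hempty
        rw [hgood] at hnil
        exact List.map_eq_nil_iff.mp hnil
      have hall : ∀ s ∈ pvStatuses rid ridg pd pid keys 0, s = 0 := by
        intro s hs
        have := (filter_zipIdx_eq_nil (fun t => decide (t ≠ 0)) _ 0).mp hfe s hs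
        simpa using this
      have hmax0 : (pvStatuses rid ridg pd pid keys 0).foldr max 0 = 0 :=
        (foldr_max_eq_zero_iff _).mpr hall
      have hno2 : (2 : Nat) ∉ pvStatuses rid ridg pd pid keys 0 := by
        intro h; have := hall 2 h; omega
      simp [hempty, hmax0, hno2, ih1, ih2, ih3]
    · -- some good sample
      have hgsne : pvGoodA keys (pvLookup pd pid) 0 ≠ [] :=
        fun h => hempty (by simp [h])
      have hmaxne0 : (pvStatuses rid ridg pd pid keys 0).foldr max 0 ≠ 0 := by
        intro hz
        apply hgsne
        rw [hgood]
        rw [(filter_zipIdx_eq_nil (fun t => decide (t ≠ 0)) _ 0).mpr ?_]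
        · rfl
        · intro s hs
          have := (foldr_max_eq_zero_iff _).mp hz s hs
          simp [this]
      simp only [hempty, if_false, pvPass2]
      rw [hfil]
      by_cases h2 : (2 : Nat) ∈ pvStatuses rid ridg pd pid keys 0
      · -- passed
        have hfne : ((pvStatuses rid ridg pd pid keys 0).zipIdx 0).filter
            (fun q => q.1 == 2) ≠ [] := by
          intro h
          exact absurd ((filter_zipIdx_eq_nil (fun t => t == 2) _ 0).mp h 2 h2) (by simp)
        have hflen : (((pvStatuses rid ridg pd pid keys 0).zipIdx 0).filter
            (fun q => q.1 == 2)).map Prod.snd ≠ [] := by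
          intro h; exact hfne (List.map_eq_nil_iff.mp h)
        have hmax2 : (pvStatuses rid ridg pd pid keys 0).foldr max 0 = 2 := by
          have h1 := le_foldr_max _ 2 h2
          have hle : (pvStatuses rid ridg pd pid keys 0).foldr max 0 ≤ 2 := by
            rcases foldr_max_mem (pvStatuses rid ridg pd pid keys 0) with h0 | hm
            · omega
            · exact pvStatuses_le_two rid ridg pd pid keys 0 _ hm
          omega
        have hflen0 : ¬ ((((pvStatuses rid ridg pd pid keys 0).zipIdx 0).filter
            (fun q => q.1 == 2)).map Prod.snd).length = 0 := by
          intro h; exact hflen (List.length_eq_zero_iff.mp h)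
        rw [if_neg hflen0]
        simp [hmax2, h2, List.map_map, Function.comp, ih1, ih2, ih3]
      · -- failed
        have hfnil : ((pvStatuses rid ridg pd pid keys 0).zipIdx 0).filter
            (fun q => q.1 == 2) = [] := by
          apply (filter_zipIdx_eq_nil (fun t => t == 2) _ 0).mpr
          intro s hs hbeq
          exact h2 ((beq_iff_eq.mp hbeq) ▸ hs)
        have hmax1 : (pvStatuses rid ridg pd pid keys 0).foldr max 0 = 1 := by
          have hle : (pvStatuses rid ridg pd pid keys 0).foldr max 0 ≤ 2 := by
            rcases foldr_max_mem (pvStatuses rid ridg pd pid keys 0) with h0 | hm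
            · omega
            · exact pvStatuses_le_two rid ridg pd pid keys 0 _ hm
          have hne2 : (pvStatuses rid ridg pd pid keys 0).foldr max 0 ≠ 2 := by
            intro h
            rcases foldr_max_mem (pvStatuses rid ridg pd pid keys 0) with h0 | hm
            · omega
            · exact h2 (h ▸ hm)
          omega
        simp [hfnil, hmax1, h2, ih1, ih2, ih3]

-- ===== VERDICT (by name: the statement is the Claim_ definition above) =====
theorem hypo_filtering_spec : Claim_equal_hypo_filtering := by
  intro rid ridg rkd pd _ _
  unfold Spec_hypo_filtering hypo_filtering
  exact hypo_bucketed rid ridg pd rkd
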